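-- pv_equiv track=rewrite | github.com/paiml/depyler | examples/hard_prac_mem_compact.py | mc_compact
-- ===== SOURCE A (Python) =====
-- def mc_compact(heap: list[int], heap_size: int, forwarding: list[int]) -> int:
--     """Compact heap: move all objects to front.
--     forwarding[old_pos] = new_pos for each moved object.
--     Returns number of moves."""
--     moves: int = 0
--     write_pos: int = 0
--     read_pos: int = 0
--     while read_pos < heap_size:
--         h: int = heap[read_pos]
--         if h != 0:
--             if read_pos != write_pos:
--                 heap[write_pos] = h
--                 heap[read_pos] = 0
--                 forwarding[read_pos] = write_pos
--                 moves = moves + 1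
--             else:
--                 forwarding[read_pos] = write_pos
--             write_pos = write_pos + 1
--         read_pos = read_pos + 1
--     return moves
-- ===== SOURCE B (Python) =====
-- def mc_compact(heap: list[int], heap_size: int, forwarding: list[int]) -> int:
--     """Two-pass compaction: collect nonzero (old_pos, value) pairs, then write
--     them to consecutive front slots, recording forwarding and counting moves.
--     Mutates heap and forwarding like the original."""
--     vals = [(i, heap[i]) for i in range(heap_size) if heap[i] != 0]
--     moves = 0
--     for new_pos, (old_pos, v) in enumerate(vals):
--         heap[new_pos] = v
--         forwarding[old_pos] = new_pos
--         if old_pos != new_pos: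
--             moves += 1
--     for j in range(len(vals), max(heap_size, 0)):
--         heap[j] = 0
--     return moves
-- ===== Notes on version B (the rewrite author's own statement) =====
-- stated objective: alternative
-- what changed: Replaces the single read/write two-pointer sweep by a two-pass scheme: first collect the nonzero (index,value) pairs, then place them at consecutive front positions via enumerate, counting moves where old index differs from new; equivalence is about the return value (both versions also perform the same mutations).
-- outside the precondition, e.g. on mc_compact([1, 2], 3, [0, 0, 0]): A raises IndexError, B raises IndexError; on mc_compact([0, 5], 2, []): A raises IndexError, B raises IndexError
import Mathlib
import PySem

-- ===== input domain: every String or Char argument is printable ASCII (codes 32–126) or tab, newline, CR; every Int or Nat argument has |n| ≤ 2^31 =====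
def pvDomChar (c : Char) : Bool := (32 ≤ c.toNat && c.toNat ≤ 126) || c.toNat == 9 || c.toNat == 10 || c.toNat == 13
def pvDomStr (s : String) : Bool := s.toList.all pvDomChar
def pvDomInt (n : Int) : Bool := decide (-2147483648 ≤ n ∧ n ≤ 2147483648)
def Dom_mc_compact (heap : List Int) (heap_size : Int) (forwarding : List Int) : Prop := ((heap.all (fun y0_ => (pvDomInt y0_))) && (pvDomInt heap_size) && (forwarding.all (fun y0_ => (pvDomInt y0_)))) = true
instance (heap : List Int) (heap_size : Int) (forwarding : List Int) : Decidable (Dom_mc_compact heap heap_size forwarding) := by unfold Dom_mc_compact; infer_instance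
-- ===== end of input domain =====

-- B replaces A's single read/write two-pointer sweep by a collect-then-place two-pass
-- scheme (alternative decomposition, same cost); both mutate heap/forwarding identically
-- in Python, the equivalence proved here is about the RETURN value (number of moves).

-- ===== PORT A =====
-- A's while loop over read_pos with state (write_pos, moves). heap[read_pos] is ported
-- as (pyGet? …).getD 0: Python raises exactly where pyGet? is none, excluded by Pre_.
-- The writes to heap/forwarding never affect a later read nor the return value, so the
-- port carries no mutated state; the forwarding IndexError is excluded by Pre_ too.
def mcLoopA (heap : List Int) (heap_size read write moves : Int) : Int :=
  if h : read < heap_size then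
    let hv := (PySem.List.pyGet? heap read).getD 0
    if hv ≠ 0 then
      if read ≠ write then mcLoopA heap heap_size (read + 1) (write + 1) (moves + 1)
      else mcLoopA heap heap_size (read + 1) (write + 1) moves
    else mcLoopA heap heap_size (read + 1) write moves
  else moves
termination_by (heap_size - read).toNat
decreasing_by all_goals omega

def mc_compact (heap : List Int) (heap_size : Int) (forwarding : List Int) : Int :=
  mcLoopA heap heap_size 0 0 0

-- ===== PORT B =====
-- Source B's comprehension filter `heap[i] != 0` (the paired value is used only for the
-- heap mutation, which the port does not carry since only the return value is modeled).
def bKeep (heap : List Int) (i : Nat) : Bool :=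
  decide ((PySem.List.pyGet? heap (i : Int)).getD 0 ≠ 0)

-- Source B: pass 1 keeps the nonzero indices of range(heap_size) in order; pass 2 pairs each
-- kept old index with its new front position (enumerate = List.zipIdx) and counts the
-- pairs where old ≠ new.
def mc_compact_alt (heap : List Int) (heap_size : Int) (forwarding : List Int) : Int :=
  let vals := (List.range heap_size.toNat).filter (bKeep heap)
  (vals.zipIdx).foldl
    (fun (moves : Int) (p : Nat × Nat) => if p.1 ≠ p.2 then moves + 1 else moves) 0

-- ===== PRECONDITION & SPEC =====
-- Pre_ excludes exactly the inputs where Python A raises IndexError: heap_size exceeding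
-- len(heap), or a nonzero cell below heap_size whose index is outside forwarding.
def Pre_mc_compact (heap : List Int) (heap_size : Int) (forwarding : List Int) : Prop :=
  heap_size ≤ (heap.length : Int) ∧
    ∀ i : Nat, i < heap_size.toNat → heap.getD i 0 ≠ 0 → i < forwarding.length
instance (heap : List Int) (heap_size : Int) (forwarding : List Int) : Decidable (Pre_mc_compact heap heap_size forwarding) := by unfold Pre_mc_compact; infer_instance

def pvWitness_mc_compact : List Int × Int × List Int := ([0, 3, 0, 5], 4, [0, 0, 0, 0])

def Spec_mc_compact (heap : List Int) (heap_size : Int) (forwarding : List Int) (out : Int) : Prop := out = mc_compact_alt heap heap_size forwarding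
instance (heap : List Int) (heap_size : Int) (forwarding : List Int) (out : Int) : Decidable (Spec_mc_compact heap heap_size forwarding out) := by unfold Spec_mc_compact; infer_instance

-- ===== CLAIM (what is proved, stated in full; the proofs are below) =====
def Claim_equal_mc_compact : Prop := ∀ (heap : List Int) (heap_size : Int) (forwarding : List Int), Dom_mc_compact heap heap_size forwarding → Pre_mc_compact heap heap_size forwarding → Spec_mc_compact heap heap_size forwarding (mc_compact heap heap_size forwarding)

-- ===== LEMMAS AND PROOFS =====

-- Reference count: over a list of indices, with running write position w, count the
-- kept (nonzero) cells whose index differs from their write position.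
def cnt (heap : List Int) : List Nat → Nat → Int
  | [], _ => 0
  | i :: rest, w =>
    if bKeep heap i then (if i ≠ w then 1 else 0) + cnt heap rest (w + 1)
    else cnt heap rest w

theorem loopA_cnt (heap : List Int) (hs : Int) :
    ∀ (n : Nat) (r w : Nat) (m : Int), (hs - (r : Int)).toNat = n →
      mcLoopA heap hs (r : Int) (w : Int) m = m + cnt heap (List.range' r n) w := by
  intro n
  induction n with
  | zero =>
    intro r w m hn
    rw [mcLoopA, dif_neg (by omega)]
    simp [cnt]
  | succ n ih =>
    intro r w m hn
    rw [mcLoopA, dif_pos (by omega : (r : Int) < hs), List.range'_succ]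
    have hr1 : ((r : Int) + 1) = ((r + 1 : Nat) : Int) := by push_cast; ring
    have hw1 : ((w : Int) + 1) = ((w + 1 : Nat) : Int) := by push_cast; ring
    show (if (PySem.List.pyGet? heap (r : Int)).getD 0 ≠ 0 then
            if (r : Int) ≠ (w : Int) then
              mcLoopA heap hs ((r : Int) + 1) ((w : Int) + 1) (m + 1)
            else mcLoopA heap hs ((r : Int) + 1) ((w : Int) + 1) m
          else mcLoopA heap hs ((r : Int) + 1) (w : Int) m)
        = m + cnt heap (r :: List.range' (r + 1) n) w
    by_cases hz : (PySem.List.pyGet? heap (r : Int)).getD 0 ≠ 0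
    · have hbk : bKeep heap r = true := by simp only [bKeep, decide_eq_true_eq]; exact hz
      rw [if_pos hz]
      by_cases hw : r = w
      · subst hw
        rw [if_neg (by simp), hr1, ih (r + 1) (r + 1) m (by omega)]
        simp only [cnt, hbk, if_true, if_neg (by simp : ¬ r ≠ r)]
        ring
      · rw [if_pos (by exact_mod_cast hw), hr1, hw1, ih (r + 1) (w + 1) (m + 1) (by omega)]
        simp only [cnt, hbk, if_true, if_pos hw]
        ring
    · have hbk : bKeep heap r = false := by
        simp only [bKeep, decide_eq_false_iff_not]; exact hz
      rw [if_neg hz, hr1, ih (r + 1) w m (by omega)]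
      simp only [cnt, hbk, if_false, Bool.false_eq_true]

theorem cnt_zipIdx (heap : List Int) :
    ∀ (l : List Nat) (w : Nat) (m : Int),
      (((l.filter (bKeep heap)).zipIdx w).foldl
        (fun (moves : Int) (p : Nat × Nat) =>
          if p.1 ≠ p.2 then moves + 1 else moves) m) = m + cnt heap l w := by
  intro l
  induction l with
  | nil => intro w m; simp [cnt]
  | cons i rest ih =>
    intro w m
    by_cases hbk : bKeep heap i = true
    · rw [List.filter_cons_of_pos hbk, List.zipIdx_cons, List.foldl_cons]
      simp only [cnt, hbk, if_true]
      by_cases hw : i = w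
      · subst hw
        rw [if_neg (by simp), ih (i + 1) m]
        simp
      · rw [if_pos hw, ih (w + 1) (m + 1)]
        rw [if_pos hw]
        ring
    · rw [List.filter_cons_of_neg (by simpa using hbk), ih w m]
      simp only [cnt, hbk, Bool.false_eq_true, if_false]

-- ===== VERDICT (by name: the statement is the Claim_ definition above) =====
theorem mc_compact_spec : Claim_equal_mc_compact := by
  intro heap hs fw _ _
  have h1 := loopA_cnt heap hs hs.toNat 0 0 0 (by omega)
  have h2 := cnt_zipIdx heap (List.range hs.toNat) 0 0
  unfold Spec_mc_compact mc_compact mc_compact_alt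
  rw [← List.range_eq_range'] at h1
  simp only [Nat.cast_zero, zero_add] at h1 h2
  exact h1.trans h2.symm
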